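-- pv_equiv track=rewrite | github.com/Pnickolas1/Code-Reps | AlgoExpert/Array/max_subset_sum.py | maxSubsetSumNoAdjacent
-- ===== SOURCE A (Python) =====
-- def maxSubsetSumNoAdjacent(array):
--     """
--     time: O(n) , n is the length of the input array
--     space: O(n) space
--     :param array:
--     :return:
--     """
--
--     if not len(array):
--         return False
--     elif len(array) == 1:
--         return array[0]
--
--     maxSums = array[:]
--     maxSums[1] = max(array[0], array[1])
--     for i in range(2, len(array)):
--         maxSums[i] = max(maxSums[i -1], maxSums[i - 2] + array[i])
--     return maxSums[-1]
-- ===== SOURCE B (Python) =====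
-- def maxSubsetSumNoAdjacent(array):
--     # Divide-and-conquer over (max, +) "tropical" 2x2 matrices: the DP recurrence
--     # f(i) = max(f(i-1), f(i-2) + a_i) is a tropical linear map, so the answer is a
--     # matrix product, computed here by recursive halving instead of a sequential table.
--     if not len(array):
--         return False
--     if len(array) == 1:
--         return array[0]
--
--     def tadd(x, y):  # tropical addition = max; None is -infinity
--         if x is None:
--             return y
--         if y is None:
--             return x
--         return max(x, y)
--
--     def tmul(x, y):  # tropical multiplication = +
--         if x is None or y is None:
--             return None
--         return x + y
--
--     def mat_mul(A, B):
--         return tuple(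
--             tuple(tadd(tmul(A[i][0], B[0][j]), tmul(A[i][1], B[1][j])) for j in range(2))
--             for i in range(2)
--         )
--
--     def step(a):  # (f_i, f_{i-1}) = step(a_i) . (f_{i-1}, f_{i-2})
--         return ((0, a), (0, None))
--
--     def seg(vals):  # product step(v_last) ... step(v_first), by halving
--         if len(vals) == 1:
--             return step(vals[0])
--         mid = len(vals) // 2
--         return mat_mul(seg(vals[mid:]), seg(vals[:mid]))
--
--     f1, f0 = max(array[0], array[1]), array[0]
--     if len(array) == 2:
--         return f1
--     M = seg(array[2:])
--     return tadd(tmul(M[0][0], f1), tmul(M[0][1], f0))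
-- ===== Notes on version B (the rewrite author's own statement) =====
-- stated objective: alternative
-- what changed: Reformulates the DP recurrence f(i)=max(f(i-1), f(i-2)+a_i) as a product of 2x2 (max,+)-semiring matrices and evaluates it by recursive divide-and-conquer halving instead of A's sequential in-place table pass.
-- outside the precondition, e.g. on maxSubsetSumNoAdjacent([]): A returns False, B returns False
import Mathlib
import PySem

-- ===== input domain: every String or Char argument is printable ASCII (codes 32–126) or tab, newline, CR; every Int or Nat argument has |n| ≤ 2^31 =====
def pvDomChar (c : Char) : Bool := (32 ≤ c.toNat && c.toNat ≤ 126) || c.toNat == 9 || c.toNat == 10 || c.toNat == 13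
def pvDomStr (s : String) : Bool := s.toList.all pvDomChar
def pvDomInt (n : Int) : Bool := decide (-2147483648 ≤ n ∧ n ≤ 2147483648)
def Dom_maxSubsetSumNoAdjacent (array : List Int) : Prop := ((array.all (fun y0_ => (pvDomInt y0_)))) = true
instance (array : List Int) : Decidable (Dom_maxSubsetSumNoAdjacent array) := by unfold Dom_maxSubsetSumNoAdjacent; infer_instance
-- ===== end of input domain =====

-- B recomputes A's DP recurrence as a divide-and-conquer product of 2x2 (max,+)-semiring matrices; return value proved equal on all nonempty inputs.


-- ===== PORT A =====
-- the 'for i in range(2, len(array))' loop over the table, with fuel = number of remaining indices;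
-- all table/array reads are in range, so List.getD is exact for Python's indexing here
def pvLoopA (array : List Int) (ms : List Int) (i : Nat) (fuel : Nat) : List Int :=
  match fuel with
  | 0 => ms
  | fuel + 1 =>
      pvLoopA array (ms.set i (max (ms.getD (i - 1) 0) (ms.getD (i - 2) 0 + array.getD i 0))) (i + 1) fuel

def maxSubsetSumNoAdjacent (array : List Int) : Int :=
  match array with
  | [] => 0          -- Python returns False here (not an int); excluded by Pre_
  | [a] => a
  | a0 :: a1 :: _ =>
      let ms := array.set 1 (max a0 a1)          -- maxSums = array[:]; maxSums[1] = max(array[0], array[1])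
      let ms2 := pvLoopA array ms 2 (array.length - 2)
      ms2.getD (ms2.length - 1) 0                -- maxSums[-1]

-- ===== PORT B =====
-- tropical (max,+) arithmetic on Option Int; none plays -infinity
def tadd : Option Int → Option Int → Option Int
  | none, y => y
  | some a, none => some a
  | some a, some b => some (max a b)

def tmul : Option Int → Option Int → Option Int
  | some a, some b => some (a + b)
  | _, _ => none

def pvMat : Type := (Option Int × Option Int) × (Option Int × Option Int)

def pvMatMul (A B : pvMat) : pvMat :=
  ((tadd (tmul A.1.1 B.1.1) (tmul A.1.2 B.2.1), tadd (tmul A.1.1 B.1.2) (tmul A.1.2 B.2.2)),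
   (tadd (tmul A.2.1 B.1.1) (tmul A.2.2 B.2.1), tadd (tmul A.2.1 B.1.2) (tmul A.2.2 B.2.2)))

def pvStep (a : Int) : pvMat := ((some 0, some a), (some 0, none))

-- seg(vals): product step(v_last) ⬝ … ⬝ step(v_first) by recursive halving (Python's seg)
def pvSeg (l : List Int) : pvMat :=
  if h : l.length ≤ 1 then
    match l with
    | [] => ((some 0, none), (none, some 0))  -- totality guard; Python's seg is never called on an empty slice
    | a :: _ => pvStep a
  else
    pvMatMul (pvSeg (l.drop (l.length / 2))) (pvSeg (l.take (l.length / 2)))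
termination_by l.length
decreasing_by
  · simp only [List.length_drop]; omega
  · simp only [List.length_take]; omega

def maxSubsetSumNoAdjacent_alt (array : List Int) : Int :=
  match array with
  | [] => 0          -- Python returns False here (not an int); excluded by Pre_
  | [a] => a
  | [a0, a1] => max a0 a1
  | a0 :: a1 :: rest =>
      let M := pvSeg rest
      -- the tropical value below is always `some` (the matrix row is finite); getD extracts the int Python returns
      (tadd (tmul M.1.1 (some (max a0 a1))) (tmul M.1.2 (some a0))).getD 0

-- ===== PRECONDITION & SPEC =====
-- Pre_ excludes only the empty list, on which both Pythons return False, which is not a value of the declared Int type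
def Pre_maxSubsetSumNoAdjacent (array : List Int) : Prop := array ≠ []
instance (array : List Int) : Decidable (Pre_maxSubsetSumNoAdjacent array) := by unfold Pre_maxSubsetSumNoAdjacent; infer_instance
def pvWitness_maxSubsetSumNoAdjacent : List Int := [7, -3, 5, 10]
def Spec_maxSubsetSumNoAdjacent (array : List Int) (out : Int) : Prop := out = maxSubsetSumNoAdjacent_alt array
instance (array : List Int) (out : Int) : Decidable (Spec_maxSubsetSumNoAdjacent array out) := by unfold Spec_maxSubsetSumNoAdjacent; infer_instance

-- ===== CLAIM (what is proved, stated in full; the proofs are below) =====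
def Claim_equal_maxSubsetSumNoAdjacent : Prop := ∀ (array : List Int), Dom_maxSubsetSumNoAdjacent array → Pre_maxSubsetSumNoAdjacent array → Spec_maxSubsetSumNoAdjacent array (maxSubsetSumNoAdjacent array)

-- ===== LEMMAS AND PROOFS =====

-- tropical semiring algebra
theorem tadd_comm' (x y : Option Int) : tadd x y = tadd y x := by
  cases x <;> cases y <;> simp [tadd] <;> omega

theorem tadd_assoc' (x y z : Option Int) : tadd (tadd x y) z = tadd x (tadd y z) := by
  cases x <;> cases y <;> cases z <;> simp [tadd] <;> omega

theorem tadd_left_comm' (x y z : Option Int) : tadd x (tadd y z) = tadd y (tadd x z) := by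
  rw [← tadd_assoc', tadd_comm' x y, tadd_assoc']

theorem tmul_assoc' (x y z : Option Int) : tmul (tmul x y) z = tmul x (tmul y z) := by
  cases x <;> cases y <;> cases z <;> simp [tmul] <;> omega

theorem tmul_tadd (x y z : Option Int) : tmul x (tadd y z) = tadd (tmul x y) (tmul x z) := by
  cases x <;> cases y <;> cases z <;> simp [tmul, tadd] <;> omega

theorem tadd_tmul (x y z : Option Int) : tmul (tadd x y) z = tadd (tmul x z) (tmul y z) := by
  cases x <;> cases y <;> cases z <;> simp [tmul, tadd] <;> omega

-- applying a matrix to a column vector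
def pvApp (M : pvMat) (v : Option Int × Option Int) : Option Int × Option Int :=
  (tadd (tmul M.1.1 v.1) (tmul M.1.2 v.2), tadd (tmul M.2.1 v.1) (tmul M.2.2 v.2))

theorem pvApp_mul (A B : pvMat) (v : Option Int × Option Int) :
    pvApp (pvMatMul A B) v = pvApp A (pvApp B v) := by
  simp [pvApp, pvMatMul, tadd_tmul, tmul_tadd, tmul_assoc',
        tadd_assoc', tadd_comm', tadd_left_comm']

-- sequential application of the step matrices, left to right
def pvIter : List Int → (Option Int × Option Int) → (Option Int × Option Int)
  | [], v => v
  | x :: xs, v => pvIter xs (pvApp (pvStep x) v)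

theorem pvIter_append (s r : List Int) (v : Option Int × Option Int) :
    pvIter (s ++ r) v = pvIter r (pvIter s v) := by
  induction s generalizing v with
  | nil => rfl
  | cons x xs ih => simp [pvIter, ih]

theorem pvSeg_app (n : Nat) : ∀ (l : List Int), l.length = n → l ≠ [] →
    ∀ v, pvApp (pvSeg l) v = pvIter l v := by
  induction n using Nat.strong_induction_on with
  | _ n ih =>
    intro l hlen hne v
    rw [pvSeg]
    by_cases h1 : l.length ≤ 1
    · simp only [h1, dif_pos]
      match l, hne with
      | a :: rest, _ =>
        have : rest = [] := by
          cases rest with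
          | nil => rfl
          | cons b bs => simp at h1
        subst this
        rfl
    · simp only [h1, dif_neg, not_false_iff]
      have h2 : 2 ≤ l.length := by omega
      have hs : (l.take (l.length / 2)).length = l.length / 2 := by
        simp; omega
      have hr : (l.drop (l.length / 2)).length = l.length - l.length / 2 := by
        simp
      rw [pvApp_mul,
          ih (l.take (l.length / 2)).length (by omega) _ rfl
            (by intro hc; rw [hc] at hs; simp at hs; omega),
          ih (l.drop (l.length / 2)).length (by omega) _ rfl
            (by intro hc; rw [hc] at hr; simp at hr; omega),
          ← pvIter_append, List.take_append_drop]

-- rolling-pair reading of the step matrices on finite vectors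
def pvRoll2 : List Int → Int → Int → Int × Int
  | [], p2, p1 => (p1, p2)
  | x :: xs, p2, p1 => pvRoll2 xs p1 (max p1 (x + p2))

theorem pvIter_roll (l : List Int) : ∀ p2 p1,
    pvIter l (some p1, some p2) = (some (pvRoll2 l p2 p1).1, some (pvRoll2 l p2 p1).2) := by
  induction l with
  | nil => intro p2 p1; rfl
  | cons x xs ih =>
      intro p2 p1
      have hstep : pvApp (pvStep x) (some p1, some p2) = (some (max p1 (x + p2)), some p1) := by
        simp [pvApp, pvStep, tadd, tmul]
      simp [pvIter, pvRoll2, hstep, ih]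

-- A-side rolling scalars (bridge between the table loop and the matrix product)
def pvLoopB (rest : List Int) (p2 p1 : Int) : Int :=
  match rest with
  | [] => p1
  | x :: xs => pvLoopB xs p1 (max p1 (p2 + x))

theorem pvRoll2_fst (l : List Int) : ∀ p2 p1, (pvRoll2 l p2 p1).1 = pvLoopB l p2 p1 := by
  induction l with
  | nil => intro p2 p1; rfl
  | cons x xs ih => intro p2 p1; simp [pvRoll2, pvLoopB, ih, Int.add_comm]

-- invariant: A's table loop from index i, with the two live table cells equal to the rolling scalars,
-- produces a table whose last cell is the rolling fold over the remaining suffix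
theorem pvLoop_eq (rest : List Int) : ∀ (array ms : List Int) (i : Nat) (p2 p1 : Int),
    2 ≤ i → i ≤ array.length → array.drop i = rest → ms.length = array.length →
    ms.getD (i - 1) 0 = p1 → ms.getD (i - 2) 0 = p2 →
    (pvLoopA array ms i rest.length).getD ((pvLoopA array ms i rest.length).length - 1) 0
      = pvLoopB rest p2 p1 := by
  induction rest with
  | nil =>
      intro array ms i p2 p1 hi hile hdrop hlen h1 h2
      have hge : array.length ≤ i := List.drop_eq_nil_iff.mp hdrop
      have hlen' : i = array.length := le_antisymm hile hge
      subst hlen'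
      simp only [List.getD] at h1
      simp [pvLoopA, pvLoopB, hlen, h1]
  | cons x xs ih =>
      intro array ms i p2 p1 hi hile hdrop hlen h1 h2
      have hlt : i < array.length := by
        by_contra h
        push_neg at h
        have : array.drop i = [] := List.drop_eq_nil_of_le h
        simp [this] at hdrop
      have hx : array[i]? = some x := by
        rw [show i = i + 0 from rfl, ← List.getElem?_drop, hdrop]
        rfl
      have hdrop' : array.drop (i + 1) = xs := by
        have h' : array.drop (i + 1) = (array.drop i).drop 1 := by rw [List.drop_drop]
        simp [h', hdrop]
      have hltms : i < ms.length := by omega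
      set ms' := ms.set i (max (ms.getD (i - 1) 0) (ms.getD (i - 2) 0 + array.getD i 0)) with hms'
      have hlen' : ms'.length = array.length := by simp [hms', hlen]
      simp only [List.getD] at h1 h2
      have hget_i : ms'.getD i 0 = max p1 (p2 + x) := by
        simp [hms', List.getD, List.getElem?_set_self hltms, h1, h2, hx]
      have hget_prev : ms'.getD (i - 1) 0 = p1 := by
        have hne : i ≠ i - 1 := by omega
        simp [hms', List.getD, List.getElem?_set_ne hne, h1]
      have := ih array ms' (i + 1) p1 (max p1 (p2 + x)) (by omega) (by omega) hdrop' hlen'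
        (by simpa using hget_i) (by simpa using hget_prev)
      simpa [pvLoopA, pvLoopB, hms'] using this

theorem maxSubsetSum_A_loop (a0 a1 : Int) (rest : List Int) :
    maxSubsetSumNoAdjacent (a0 :: a1 :: rest) = pvLoopB rest a0 (max a0 a1) := by
  have hms : (a0 :: a1 :: rest).set 1 (max a0 a1) = a0 :: max a0 a1 :: rest := rfl
  have := pvLoop_eq rest (a0 :: a1 :: rest) (a0 :: max a0 a1 :: rest) 2 a0 (max a0 a1)
    (le_refl 2) (by simp) (by simp) (by simp) (by simp [List.getD]) (by simp [List.getD])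
  simpa [maxSubsetSumNoAdjacent, hms,
    show (a0 :: a1 :: rest).length - 2 = rest.length by simp] using this

theorem maxSubsetSum_eq (array : List Int) (h : array ≠ []) :
    maxSubsetSumNoAdjacent array = maxSubsetSumNoAdjacent_alt array := by
  match array with
  | [] => exact absurd rfl h
  | [a] => rfl
  | [a0, a1] =>
      rw [maxSubsetSum_A_loop]
      rfl
  | a0 :: a1 :: x :: rs =>
      rw [maxSubsetSum_A_loop]
      have hseg := pvSeg_app (x :: rs).length (x :: rs) rfl (by simp)
        (some (max a0 a1), some a0)
      have happ : (pvApp (pvSeg (x :: rs)) (some (max a0 a1), some a0)).1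
          = tadd (tmul (pvSeg (x :: rs)).1.1 (some (max a0 a1)))
                 (tmul (pvSeg (x :: rs)).1.2 (some a0)) := rfl
      show pvLoopB (x :: rs) a0 (max a0 a1)
        = (tadd (tmul (pvSeg (x :: rs)).1.1 (some (max a0 a1)))
                (tmul (pvSeg (x :: rs)).1.2 (some a0))).getD 0
      rw [← happ, hseg, pvIter_roll]
      simp [pvRoll2_fst]

-- ===== VERDICT (by name: the statement is the Claim_ definition above) =====
theorem maxSubsetSumNoAdjacent_spec : Claim_equal_maxSubsetSumNoAdjacent := by
  intro array _ hpre
  exact maxSubsetSum_eq array hpre
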